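-- pv_equiv track=rewrite | github.com/dumindu2041329/pdf-tools | lib/pdf/pdf_to_xlsx.py | detect_col_merges
-- ===== SOURCE A (Python) =====
-- def detect_col_merges(table):
--     """
--     Return dict  {(row_idx_0based, col_idx_0based): row_span}
--     for cells that should be merged vertically (same value, consecutive rows,
--     only when the column has None beneath it).
--     """
--     if not table:
--         return {}
--
--     max_col = max(len(r) for r in table)
--     col_merges = {}
--
--     for c in range(max_col):
--         r = 0
--         while r < len(table):
--             val = table[r][c] if c < len(table[r]) else None
--             if val not in (None, ""):
--                 span = 1
--                 while (r + span < len(table) and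
--                        (c >= len(table[r + span]) or
--                         table[r + span][c] in (None, ""))):
--                     span += 1
--                 if span > 1:
--                     col_merges[(r, c)] = span
--                 r += span
--             else:
--                 r += 1
--     return col_merges
-- ===== SOURCE B (Python) =====
-- def detect_col_merges(table):
--     """Same result as A, but each column is handled by one linear pass keeping an
--     open anchor row + running span, instead of a nested while-with-jump."""
--     if not table:
--         return {}
--     n_cols = max(len(row) for row in table)
--     merges = {}
--     for c in range(n_cols):
--         anchor = None
--         span = 0
--         for r, row in enumerate(table):
--             val = row[c] if c < len(row) else None
--             if val not in (None, ""):
--                 if anchor is not None and span > 1: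
--                     merges[(anchor, c)] = span
--                 anchor, span = r, 1
--             elif anchor is not None:
--                 span += 1
--         if anchor is not None and span > 1:
--             merges[(anchor, c)] = span
--     return merges
-- ===== Notes on version B (the rewrite author's own statement) =====
-- stated objective: simpler
-- what changed: Each column is processed by one linear pass over the rows maintaining an open anchor row and a running span (flush on the next non-empty cell and once at the end), replacing A's nested while loop that re-scans the empty run below each anchor and jumps the row index by the computed span.
import Mathlib
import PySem

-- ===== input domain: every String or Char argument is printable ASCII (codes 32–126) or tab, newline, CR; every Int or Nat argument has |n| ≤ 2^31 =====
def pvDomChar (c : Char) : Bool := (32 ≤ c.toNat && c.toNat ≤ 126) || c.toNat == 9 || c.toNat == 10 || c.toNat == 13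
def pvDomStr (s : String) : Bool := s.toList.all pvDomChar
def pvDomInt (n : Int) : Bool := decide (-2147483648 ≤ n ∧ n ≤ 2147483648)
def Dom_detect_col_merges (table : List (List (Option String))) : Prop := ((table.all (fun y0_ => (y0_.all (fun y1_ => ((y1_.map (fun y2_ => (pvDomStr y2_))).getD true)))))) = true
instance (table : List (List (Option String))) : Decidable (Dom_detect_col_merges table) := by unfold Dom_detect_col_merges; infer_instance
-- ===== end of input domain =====

-- B rewrites each column's nested while-with-jump as one linear pass keeping an open anchor row
-- and a running span (objective: simpler decomposition; same asymptotic cost).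

-- ===== PORT A =====
-- val = table[r][c] if c < len(table[r]) else None  (r is always < len(table) at call sites)
def pvCell (table : List (List (Option String))) (r c : Nat) : Option String :=
  let row := table.getD r []
  if c < row.length then row.getD c none else none

-- Python's  v in (None, "")  for v the cell value
def pvEmpty (v : Option String) : Bool := v == none || v == some ""

-- inner  while … : span += 1  of A
def pvSpanA (table : List (List (Option String))) (c r span : Nat) : Nat :=
  if h : r + span < table.length ∧ pvEmpty (pvCell table (r + span) c) = true then
    pvSpanA table c r (span + 1)
  else span
termination_by table.length - (r + span)
decreasing_by omega

-- needed by pvRowLoopA's termination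
theorem pvSpanA_ge (table : List (List (Option String))) (c r : Nat) :
    ∀ span, span ≤ pvSpanA table c r span := by
  intro span
  fun_induction pvSpanA <;> omega

-- the  while r < len(table)  loop of A, for one column c, over the dict col_merges
def pvRowLoopA (table : List (List (Option String))) (c r : Nat)
    (d : PySem.Dict (Int × Int) Int) : PySem.Dict (Int × Int) Int :=
  if h : r < table.length then
    if pvEmpty (pvCell table r c) = false then
      let span := pvSpanA table c r 1
      pvRowLoopA table c (r + span)
        (if 1 < span then d.insert ((r : Int), (c : Int)) (span : Int) else d)
    else
      pvRowLoopA table c (r + 1) d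
  else d
termination_by table.length - r
decreasing_by
  · have := pvSpanA_ge table c r 1; omega
  · omega

def detect_col_merges (table : List (List (Option String))) : List (Int × Int × Int) :=
  if table = [] then []
  else
    let maxCol := (PySem.List.max? (table.map (fun r => r.length)) (fun y => y)).getD 0
    let d := (List.range maxCol).foldl (fun d c => pvRowLoopA table c 0 d) PySem.Dict.empty
    d.items.map (fun p => (p.1.1, p.1.2, p.2))

-- ===== PORT B =====
-- flush of the open anchor:  if anchor is not None and span > 1: merges[(anchor, c)] = span
def pvFlushB (c : Nat) (anchor : Option Nat) (span : Nat)
    (acc : List (Int × Int × Int)) : List (Int × Int × Int) :=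
  match anchor with
  | some a => if 1 < span then acc ++ [((a : Int), (c : Int), (span : Int))] else acc
  | none => acc

-- B's single pass over the rows of column c (state: anchor, span, merges-so-far)
def pvRowLoopB (table : List (List (Option String))) (c r : Nat)
    (anchor : Option Nat) (span : Nat) (acc : List (Int × Int × Int)) : List (Int × Int × Int) :=
  if r < table.length then
    if pvEmpty (pvCell table r c) = false then
      pvRowLoopB table c (r + 1) (some r) 1 (pvFlushB c anchor span acc)
    else
      match anchor with
      | some a => pvRowLoopB table c (r + 1) (some a) (span + 1) acc
      | none => pvRowLoopB table c (r + 1) none span acc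
  else pvFlushB c anchor span acc
termination_by table.length - r

def detect_col_merges_alt (table : List (List (Option String))) : List (Int × Int × Int) :=
  if table = [] then []
  else
    let nCols := (PySem.List.max? (table.map (fun r => r.length)) (fun y => y)).getD 0
    (List.range nCols).foldl (fun acc c => pvRowLoopB table c 0 none 0 acc) []

-- ===== PRECONDITION & SPEC =====
def Spec_detect_col_merges (table : List (List (Option String))) (out : List (Int × Int × Int)) : Prop := out = detect_col_merges_alt table
instance (table : List (List (Option String))) (out : List (Int × Int × Int)) : Decidable (Spec_detect_col_merges table out) := by unfold Spec_detect_col_merges; infer_instance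

-- ===== CLAIM (what is proved, stated in full; the proofs are below) =====
def Claim_equal_detect_col_merges : Prop := ∀ (table : List (List (Option String))), Dom_detect_col_merges table → Spec_detect_col_merges table (detect_col_merges table)

-- ===== LEMMAS AND PROOFS =====

-- reference per-column result, as a list of (row, col, span) triples
def pvListA (table : List (List (Option String))) (c r : Nat) : List (Int × Int × Int) :=
  if h : r < table.length then
    if pvEmpty (pvCell table r c) = false then
      let s := pvSpanA table c r 1
      (if 1 < s then [((r : Int), (c : Int), (s : Int))] else []) ++ pvListA table c (r + s)
    else pvListA table c (r + 1)
  else []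
termination_by table.length - r
decreasing_by
  · have := pvSpanA_ge table c r 1; omega
  · omega

theorem pvFlushB_acc (c : Nat) (anchor : Option Nat) (span : Nat) (acc : List (Int × Int × Int)) :
    pvFlushB c anchor span acc = acc ++ pvFlushB c anchor span [] := by
  cases anchor with
  | none => simp [pvFlushB]
  | some a => simp only [pvFlushB]; split <;> simp

theorem pvRowLoopB_acc (table : List (List (Option String))) (c : Nat) :
    ∀ (m r : Nat) (anchor : Option Nat) (span : Nat) (acc : List (Int × Int × Int)),
      table.length - r ≤ m →
      pvRowLoopB table c r anchor span acc = acc ++ pvRowLoopB table c r anchor span [] := by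
  intro m
  induction m with
  | zero =>
    intro r anchor span acc h
    have hr : ¬ r < table.length := by omega
    rw [pvRowLoopB.eq_def]; conv_rhs => rw [pvRowLoopB.eq_def]
    simp only [hr, if_false]
    exact pvFlushB_acc c anchor span acc
  | succ m ih =>
    intro r anchor span acc h
    by_cases hr : r < table.length
    · rw [pvRowLoopB.eq_def]; conv_rhs => rw [pvRowLoopB.eq_def]
      simp only [hr, if_true]
      by_cases hv : pvEmpty (pvCell table r c) = false
      · simp only [hv, if_true]
        rw [ih (r+1) (some r) 1 (pvFlushB c anchor span acc) (by omega),
            ih (r+1) (some r) 1 (pvFlushB c anchor span []) (by omega),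
            pvFlushB_acc c anchor span acc]
        simp [List.append_assoc]
      · simp only [hv, Bool.true_eq_false, if_false]
        cases anchor with
        | some a =>
          try dsimp only
          rw [ih (r+1) (some a) (span+1) acc (by omega)]
        | none =>
          try dsimp only
          rw [ih (r+1) none span acc (by omega)]
    · rw [pvRowLoopB.eq_def]; conv_rhs => rw [pvRowLoopB.eq_def]
      simp only [hr, if_false]
      exact pvFlushB_acc c anchor span acc

theorem pvRowLoopB_span (table : List (List (Option String))) (c : Nat) :
    ∀ (m a k : Nat), 1 ≤ k → table.length - (a + k) ≤ m →
      pvRowLoopB table c (a + k) (some a) k [] =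
        (if 1 < pvSpanA table c a k then
            [((a : Int), (c : Int), ((pvSpanA table c a k : Nat) : Int))] else []) ++
          pvListA table c (a + pvSpanA table c a k) := by
  intro m
  induction m with
  | zero =>
    intro a k hk h
    have hak : ¬ a + k < table.length := by omega
    have hs : pvSpanA table c a k = k := by rw [pvSpanA]; simp [hak]
    rw [pvRowLoopB.eq_def]
    simp only [hak, if_false, hs]
    rw [pvListA.eq_def]
    simp only [hak, reduceDIte]
    simp [pvFlushB]
  | succ m ih =>
    intro a k hk h
    by_cases hak : a + k < table.length
    · by_cases hv : pvEmpty (pvCell table (a + k) c) = true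
      · have hs : pvSpanA table c a k = pvSpanA table c a (k + 1) := by
          rw [pvSpanA]; simp [hak, hv]
        have hv' : ¬ pvEmpty (pvCell table (a + k) c) = false := by simp [hv]
        rw [pvRowLoopB.eq_def]
        simp only [hak, if_true, hv', Bool.true_eq_false, if_false]
        try dsimp only
        have hrec := ih a (k + 1) (by omega) (by omega)
        rw [show a + k + 1 = a + (k + 1) by omega, hrec, hs]
      · have hv2 : pvEmpty (pvCell table (a + k) c) = false := by
          revert hv; cases pvEmpty (pvCell table (a + k) c) <;> simp
        have hs : pvSpanA table c a k = k := by rw [pvSpanA]; simp [hv2]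
        rw [pvRowLoopB.eq_def]
        simp only [hak, if_true, hv2, if_true]
        rw [pvRowLoopB_acc table c m (a + k + 1) (some (a + k)) 1 _ (by omega)]
        have hrec := ih (a + k) 1 (le_refl 1) (by omega)
        rw [hrec, hs]
        conv_rhs => rw [pvListA.eq_def]
        simp only [hak, hv2, dif_pos, if_true]
        simp [pvFlushB]
    · have hs : pvSpanA table c a k = k := by rw [pvSpanA]; simp [hak]
      rw [pvRowLoopB.eq_def]
      simp only [hak, if_false, hs]
      rw [pvListA.eq_def]
      simp only [hak, reduceDIte]
      simp [pvFlushB]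

theorem pvRowLoopB_none (table : List (List (Option String))) (c : Nat) :
    ∀ (m r span : Nat), table.length - r ≤ m →
      pvRowLoopB table c r none span [] = pvListA table c r := by
  intro m
  induction m with
  | zero =>
    intro r span h
    have hr : ¬ r < table.length := by omega
    rw [pvRowLoopB.eq_def, pvListA.eq_def]
    simp [hr, pvFlushB]
  | succ m ih =>
    intro r span h
    by_cases hr : r < table.length
    · by_cases hv : pvEmpty (pvCell table r c) = false
      · rw [pvRowLoopB.eq_def]
        simp only [hr, if_true, hv, if_true]
        have := pvRowLoopB_span table c m r 1 (le_refl 1) (by omega)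
        rw [show pvFlushB c none span [] = ([] : List (Int × Int × Int)) from rfl, this]
        conv_rhs => rw [pvListA.eq_def]
        simp only [hr, hv, dif_pos, if_true]
      · have hv2 : ¬ pvEmpty (pvCell table r c) = false := hv
        rw [pvRowLoopB.eq_def]
        simp only [hr, if_true, hv2, Bool.true_eq_false, if_false]
        try dsimp only
        rw [ih (r + 1) span (by omega)]
        conv_rhs => rw [pvListA.eq_def]
        have hv3 : pvEmpty (pvCell table r c) = true := by
          revert hv; cases pvEmpty (pvCell table r c) <;> simp
        simp only [hr, hv3, Bool.true_eq_false, if_false, dif_pos]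
    · rw [pvRowLoopB.eq_def, pvListA.eq_def]
      simp [hr, pvFlushB]

theorem pvListA_shape (table : List (List (Option String))) (c : Nat) :
    ∀ (m r : Nat), table.length - r ≤ m →
      ∀ t ∈ pvListA table c r, t.2.1 = (c : Int) ∧ (r : Int) ≤ t.1 := by
  intro m
  induction m with
  | zero =>
    intro r h t ht
    have hr : ¬ r < table.length := by omega
    rw [pvListA.eq_def] at ht
    simp [hr] at ht
  | succ m ih =>
    intro r h t ht
    by_cases hr : r < table.length
    · rw [pvListA.eq_def] at ht
      simp only [hr, dif_pos] at ht
      by_cases hv : pvEmpty (pvCell table r c) = false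
      · simp only [hv, if_true] at ht
        have hs1 : 1 ≤ pvSpanA table c r 1 := pvSpanA_ge table c r 1
        rcases List.mem_append.mp ht with h1 | h2
        · rcases (by split at h1 <;> simp_all : t = ((r : Int), (c : Int), ((pvSpanA table c r 1 : Nat) : Int))) with rfl
          exact ⟨rfl, le_refl _⟩
        · obtain ⟨h1, h2⟩ := ih (r + pvSpanA table c r 1) (by omega) t h2
          refine ⟨h1, le_trans ?_ h2⟩
          push_cast; omega
      · have hv3 : pvEmpty (pvCell table r c) = true := by
          revert hv; cases pvEmpty (pvCell table r c) <;> simp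
        simp only [hv3, Bool.true_eq_false, if_false] at ht
        obtain ⟨h1, h2⟩ := ih (r + 1) (by omega) t ht
        refine ⟨h1, le_trans ?_ h2⟩
        push_cast; omega
    · rw [pvListA.eq_def] at ht
      simp [hr] at ht

theorem pvRowLoopA_items (table : List (List (Option String))) (c : Nat) :
    ∀ (m r : Nat) (d : PySem.Dict (Int × Int) Int), table.length - r ≤ m →
      (∀ p ∈ d.keys, p.2 < (c : Int) ∨ (p.2 = (c : Int) ∧ p.1 < (r : Int))) →
      (pvRowLoopA table c r d).items =
        d.items ++ (pvListA table c r).map (fun t => ((t.1, t.2.1), t.2.2)) := by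
  intro m
  induction m with
  | zero =>
    intro r d h hinv
    have hr : ¬ r < table.length := by omega
    rw [pvRowLoopA.eq_def, pvListA.eq_def]
    simp [hr]
  | succ m ih =>
    intro r d h hinv
    by_cases hr : r < table.length
    · by_cases hv : pvEmpty (pvCell table r c) = false
      · rw [pvRowLoopA.eq_def]
        simp only [hr, dif_pos, hv, if_true]
        have hs1 : 1 ≤ pvSpanA table c r 1 := pvSpanA_ge table c r 1
        by_cases hsp : 1 < pvSpanA table c r 1
        · simp only [hsp, if_true]
          have hfresh : d.contains ((r : Int), (c : Int)) = false := by
            cases hcon : d.contains ((r : Int), (c : Int)) with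
            | false => rfl
            | true =>
              exfalso
              have hmem := (PySem.Dict.contains_iff_mem_keys d _).mp hcon
              rcases hinv _ hmem with h1 | ⟨h1, h2⟩ <;> simp_all
          have hinv' : ∀ p ∈ (d.insert ((r : Int), (c : Int)) ((pvSpanA table c r 1 : Nat) : Int)).keys,
              p.2 < (c : Int) ∨ (p.2 = (c : Int) ∧ p.1 < ((r + pvSpanA table c r 1 : Nat) : Int)) := by
            intro p hp
            rcases (PySem.Dict.mem_keys_insert d _ p _).mp hp with rfl | hp'
            · right; constructor
              · rfl
              · push_cast; omega
            · rcases hinv p hp' with h1 | ⟨h1, h2⟩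
              · exact Or.inl h1
              · right; refine ⟨h1, lt_of_lt_of_le h2 ?_⟩
                push_cast; omega
          rw [ih (r + pvSpanA table c r 1) _ (by omega) hinv',
              PySem.Dict.items_insert_of_not_contains d _ hfresh]
          conv_rhs => rw [pvListA.eq_def]
          simp only [hr, hv, dif_pos, if_true, hsp]
          simp [List.append_assoc]
        · simp only [hsp, if_false]
          have hinv' : ∀ p ∈ d.keys,
              p.2 < (c : Int) ∨ (p.2 = (c : Int) ∧ p.1 < ((r + pvSpanA table c r 1 : Nat) : Int)) := by
            intro p hp
            rcases hinv p hp with h1 | ⟨h1, h2⟩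
            · exact Or.inl h1
            · right; refine ⟨h1, lt_of_lt_of_le h2 ?_⟩
              push_cast; omega
          rw [ih (r + pvSpanA table c r 1) d (by omega) hinv']
          conv_rhs => rw [pvListA.eq_def]
          simp only [hr, hv, dif_pos, if_true, hsp, if_false]
          simp
      · have hv3 : pvEmpty (pvCell table r c) = true := by
          revert hv; cases pvEmpty (pvCell table r c) <;> simp
        rw [pvRowLoopA.eq_def]
        simp only [hr, dif_pos, hv3, Bool.true_eq_false, if_false]
        have hinv' : ∀ p ∈ d.keys, p.2 < (c : Int) ∨ (p.2 = (c : Int) ∧ p.1 < ((r + 1 : Nat) : Int)) := by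
          intro p hp
          rcases hinv p hp with h1 | ⟨h1, h2⟩
          · exact Or.inl h1
          · right; refine ⟨h1, lt_of_lt_of_le h2 ?_⟩
            push_cast; omega
        rw [ih (r + 1) d (by omega) hinv']
        conv_rhs => rw [pvListA.eq_def]
        simp only [hr, hv3, Bool.true_eq_false, if_false, dif_pos]
    · rw [pvRowLoopA.eq_def, pvListA.eq_def]
      simp [hr]

theorem pvFoldA_items (table : List (List (Option String))) :
    ∀ (cs : List Nat) (d : PySem.Dict (Int × Int) Int), cs.Pairwise (· < ·) →
      (∀ c ∈ cs, ∀ p ∈ d.keys, p.2 < (c : Int)) →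
      (cs.foldl (fun d c => pvRowLoopA table c 0 d) d).items =
        d.items ++ cs.flatMap (fun c => (pvListA table c 0).map (fun t => ((t.1, t.2.1), t.2.2))) := by
  intro cs
  induction cs with
  | nil => intro d _ _; simp
  | cons c rest ih =>
    intro d hpw hinv
    have hrow := pvRowLoopA_items table c table.length 0 d (by omega)
      (by intro p hp; exact Or.inl ((hinv c (by simp)) p hp))
    have hkeys : ∀ c' ∈ rest, ∀ p ∈ (pvRowLoopA table c 0 d).keys, p.2 < (c' : Int) := by
      intro c' hc' p hp
      have hlt : c < c' := (List.pairwise_cons.mp hpw).1 c' hc'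
      simp only [PySem.Dict.keys] at hp
      rw [hrow] at hp
      rcases List.mem_map.mp hp with ⟨q, hq, rfl⟩
      rcases List.mem_append.mp hq with h1 | h2
      · have := hinv c' (by simp [hc']) q.1 (by
          simp only [PySem.Dict.keys]; exact List.mem_map.mpr ⟨q, h1, rfl⟩)
        exact this
      · rcases List.mem_map.mp h2 with ⟨t, ht, rfl⟩
        have := (pvListA_shape table c table.length 0 (by omega) t ht).1
        simp only [this]
        exact_mod_cast hlt
    rw [List.foldl_cons, ih (pvRowLoopA table c 0 d) (List.pairwise_cons.mp hpw).2 hkeys, hrow]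
    simp [List.append_assoc]

theorem pvFoldB (table : List (List (Option String))) :
    ∀ (cs : List Nat) (acc : List (Int × Int × Int)),
      cs.foldl (fun acc c => pvRowLoopB table c 0 none 0 acc) acc =
        acc ++ cs.flatMap (fun c => pvListA table c 0) := by
  intro cs
  induction cs with
  | nil => intro acc; simp
  | cons c rest ih =>
    intro acc
    rw [List.foldl_cons,
        pvRowLoopB_acc table c table.length 0 none 0 acc (by omega),
        pvRowLoopB_none table c table.length 0 0 (by omega), ih]
    simp [List.append_assoc]

-- ===== VERDICT (by name: the statement is the Claim_ definition above) =====
theorem detect_col_merges_spec : Claim_equal_detect_col_merges := by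
  intro table _
  unfold Spec_detect_col_merges detect_col_merges detect_col_merges_alt
  split
  · rfl
  · try dsimp only
    rw [pvFoldA_items table _ _ (List.pairwise_lt_range) (by simp [PySem.Dict.keys_empty]),
        pvFoldB]
    simp [List.map_flatMap, Function.comp_def, PySem.Dict.empty]
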